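-- pv_equiv track=rewrite | github.com/darryl-ad/advent-of-code | 2023/day3/day03.py | parse_for_nums
-- ===== SOURCE A (Python) =====
-- def parse_for_nums(line):
--     nums = []
--     idxs = []
--     num = []
--     for i, c in enumerate(line):
--         if not c.isdigit():
--             if num:
--                 nums.append(num)
--                 idxs.append(idx)
--                 num = None
--             continue
--         else:
--             if not num:
--                 num = c
--                 idx = i
--             else:
--                 num +=c
--
--             if i == len(line) - 1:
--                 nums.append(num)
--                 idxs.append(idx)
--
--     return nums, idxs
-- ===== SOURCE B (Python) =====
-- def parse_for_nums(line):
--     nums, idxs = [], []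
--     i, n = 0, len(line)
--     while i < n:
--         if line[i].isdigit():
--             j = i
--             while j < n and line[j].isdigit():
--                 j += 1
--             nums.append(line[i:j])
--             idxs.append(i)
--             i = j
--         else:
--             i += 1
--     return nums, idxs
-- ===== Notes on version B (the rewrite author's own statement) =====
-- stated objective: simpler
-- what changed: Replaces the per-character accumulator state machine (pending digit buffer, start index, last-index flush check) with a stateless two-pointer run scanner that slices each maximal digit run out of the line directly.
import Mathlib
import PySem

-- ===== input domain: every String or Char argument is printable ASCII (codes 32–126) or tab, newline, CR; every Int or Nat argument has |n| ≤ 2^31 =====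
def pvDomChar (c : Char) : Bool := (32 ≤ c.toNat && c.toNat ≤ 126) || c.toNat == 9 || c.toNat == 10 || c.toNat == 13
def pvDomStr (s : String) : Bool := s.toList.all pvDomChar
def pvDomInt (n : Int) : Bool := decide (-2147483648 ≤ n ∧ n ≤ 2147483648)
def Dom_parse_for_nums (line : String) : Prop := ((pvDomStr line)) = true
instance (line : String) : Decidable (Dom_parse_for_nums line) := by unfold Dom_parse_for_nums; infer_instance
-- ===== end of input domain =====

-- B is simpler: a stateless two-pointer digit-run scanner instead of A's
-- per-character accumulator state machine; same (nums, idxs) on the domain.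

-- ===== PORT A =====
-- A's loop, step for step: `num` is the pending digit string with its start index
-- (Python's falsy `[]`/`None` states are both the `none` case, and `idx` is only
-- ever read while `num` is truthy); `n = len(line)`.
def pvAgo (n : Nat) : Nat → List Char → List String → List Int →
    Option (String × Nat) → List String × List Int
  | _, [], nums, idxs, _ => (nums, idxs)
  | i, c :: cs, nums, idxs, num =>
    if ¬ PySem.Chars.isdigit c then
      match num with
      | some (s, idx) => pvAgo n (i+1) cs (nums ++ [s]) (idxs ++ [(idx : Int)]) none
      | none => pvAgo n (i+1) cs nums idxs none
    else
      let num' : String × Nat :=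
        match num with
        | none => (String.ofList [c], i)
        | some (s, idx) => (String.ofList (s.toList ++ [c]), idx)
      if i = n - 1 then
        pvAgo n (i+1) cs (nums ++ [num'.1]) (idxs ++ [(num'.2 : Int)]) (some num')
      else
        pvAgo n (i+1) cs nums idxs (some num')

def parse_for_nums (line : String) : List String × List Int :=
  pvAgo line.toList.length 0 line.toList [] [] none

-- ===== PORT B =====
-- B's scanner: skip a non-digit, or slice off the maximal digit run starting at i
-- (the inner while-loop advancing j is takeWhile/dropWhile on the tail, the
-- slice line[i:j] is the run) and emit it with its start index.
def pvBgo : Nat → List Char → List String × List Int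
  | _, [] => ([], [])
  | i, c :: cs =>
    if PySem.Chars.isdigit c then
      let run := c :: cs.takeWhile PySem.Chars.isdigit
      let rest := cs.dropWhile PySem.Chars.isdigit
      let p := pvBgo (i + run.length) rest
      (String.ofList run :: p.1, (i : Int) :: p.2)
    else
      pvBgo (i+1) cs
termination_by _ cs => cs.length
decreasing_by
  · exact Nat.lt_succ_of_le (List.length_dropWhile_le _ _)
  · simp

def parse_for_nums_alt (line : String) : List String × List Int :=
  pvBgo 0 line.toList

-- ===== PRECONDITION & SPEC =====
def Spec_parse_for_nums (line : String) (out : List String × List Int) : Prop := out = parse_for_nums_alt line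
instance (line : String) (out : List String × List Int) : Decidable (Spec_parse_for_nums line out) := by unfold Spec_parse_for_nums; infer_instance

-- ===== CLAIM (what is proved, stated in full; the proofs are below) =====
def Claim_equal_parse_for_nums : Prop := ∀ (line : String), Dom_parse_for_nums line → Spec_parse_for_nums line (parse_for_nums line)

-- ===== LEMMAS AND PROOFS =====

-- Joint invariant, by induction on a bound of the remaining characters, with
-- n = i + cs.length (so A's `i = n - 1` test means `cs` is a singleton):
-- * from the `none` state, A appends exactly what B emits from index i;
-- * from the `some (s, idx)` state (run in progress), A flushes s extended by the
--   leading digit run of cs, then continues like B — unless cs = [], where the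
--   flush already happened at i = n - 1 and A just returns the accumulators.
theorem pvAB : ∀ (m : Nat) (cs : List Char), cs.length ≤ m →
    (∀ i nums idxs, pvAgo (i + cs.length) i cs nums idxs none =
        (nums ++ (pvBgo i cs).1, idxs ++ (pvBgo i cs).2)) ∧
    (∀ i s idx nums idxs, pvAgo (i + cs.length) i cs nums idxs (some (s, idx)) =
        match cs with
        | [] => (nums, idxs)
        | _ :: _ =>
          (nums ++ [String.ofList (s.toList ++ cs.takeWhile PySem.Chars.isdigit)] ++
             (pvBgo (i + (cs.takeWhile PySem.Chars.isdigit).length)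
               (cs.dropWhile PySem.Chars.isdigit)).1,
           idxs ++ [(idx : Int)] ++
             (pvBgo (i + (cs.takeWhile PySem.Chars.isdigit).length)
               (cs.dropWhile PySem.Chars.isdigit)).2)) := by
  intro m
  induction m with
  | zero =>
    intro cs hcs
    have : cs = [] := List.eq_nil_of_length_eq_zero (Nat.le_zero.mp hcs)
    subst this
    constructor
    · intro i nums idxs; simp [pvAgo, pvBgo]
    · intro i s idx nums idxs; simp [pvAgo]
  | succ m IH =>
    intro cs hcs
    match cs with
    | [] =>
      constructor
      · intro i nums idxs; simp [pvAgo, pvBgo]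
      · intro i s idx nums idxs; simp [pvAgo]
    | c :: rest =>
      have hr : rest.length ≤ m := by
        have : rest.length + 1 ≤ m + 1 := by simpa using hcs
        omega
      have hlen : (c :: rest).length = rest.length + 1 := rfl
      constructor
      · -- none state
        intro i nums idxs
        by_cases hd : PySem.Chars.isdigit c
        · -- digit: start a run
          by_cases hrest : rest = []
          · subst hrest
            simp [pvAgo, pvBgo, hd, List.takeWhile, List.dropWhile]
          · have step : pvAgo (i + (c :: rest).length) i (c :: rest) nums idxs none =
                pvAgo ((i+1) + rest.length) (i+1) rest nums idxs
                  (some (String.ofList [c], i)) := by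
              rw [hlen]; simp only [pvAgo, hd, Bool.not_true, false_and, reduceIte, not_true_eq_false,
                if_false]
              have e : i + (rest.length + 1) = i + 1 + rest.length := by omega
              rw [e]
              simp [hrest]
            rw [step, (IH rest hr).2 (i+1) (String.ofList [c]) i nums idxs]
            match rest, hrest with
            | r :: rs, _ =>
              have harith : i + 1 + (List.takeWhile PySem.Chars.isdigit (r :: rs)).length
                  = i + (c :: List.takeWhile PySem.Chars.isdigit (r :: rs)).length := by
                simp; omega
              simp only [pvBgo, hd, if_true]
              rw [harith]
              simp
        · -- non-digit: skip
          have step : pvAgo (i + (c :: rest).length) i (c :: rest) nums idxs none =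
              pvAgo ((i+1) + rest.length) (i+1) rest nums idxs none := by
            rw [hlen]; simp only [pvAgo, hd]
            have e : i + (rest.length + 1) = i + 1 + rest.length := by omega
            rw [e]
            simp
          rw [step, (IH rest hr).1]
          simp [pvBgo, hd]
      · -- some state
        intro i s idx nums idxs
        by_cases hd : PySem.Chars.isdigit c
        · by_cases hrest : rest = []
          · subst hrest
            simp [pvAgo, hd, List.takeWhile, List.dropWhile, pvBgo]
          · have step : pvAgo (i + (c :: rest).length) i (c :: rest) nums idxs (some (s, idx)) =
                pvAgo ((i+1) + rest.length) (i+1) rest nums idxs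
                  (some (String.ofList (s.toList ++ [c]), idx)) := by
              rw [hlen]; simp only [pvAgo, hd, Bool.not_true, false_and, reduceIte, not_true_eq_false,
                if_false]
              have e : i + (rest.length + 1) = i + 1 + rest.length := by omega
              rw [e]
              simp [hrest]
            rw [step, (IH rest hr).2 (i+1) (String.ofList (s.toList ++ [c])) idx nums idxs]
            match rest, hrest with
            | r :: rs, _ =>
              have harith : i + 1 + (List.takeWhile PySem.Chars.isdigit (r :: rs)).length
                  = i + (c :: List.takeWhile PySem.Chars.isdigit (r :: rs)).length := by
                simp; omega
              have htw : List.takeWhile PySem.Chars.isdigit (c :: r :: rs)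
                  = c :: List.takeWhile PySem.Chars.isdigit (r :: rs) := by
                simp [List.takeWhile, hd]
              have hdw : List.dropWhile PySem.Chars.isdigit (c :: r :: rs)
                  = List.dropWhile PySem.Chars.isdigit (r :: rs) := by
                simp [List.dropWhile, hd]
              rw [harith, htw, hdw]
              simp
        · have step : pvAgo (i + (c :: rest).length) i (c :: rest) nums idxs (some (s, idx)) =
              pvAgo ((i+1) + rest.length) (i+1) rest (nums ++ [s]) (idxs ++ [(idx : Int)]) none := by
            rw [hlen]; simp only [pvAgo, hd]
            have e : i + (rest.length + 1) = i + 1 + rest.length := by omega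
            rw [e]
            simp
          rw [step, (IH rest hr).1]
          cases rest with
          | nil => simp [pvAgo, pvBgo, List.takeWhile, List.dropWhile, hd]
          | cons r rs => simp [pvBgo, List.takeWhile, List.dropWhile, hd]

-- ===== VERDICT (by name: the statement is the Claim_ definition above) =====
theorem parse_for_nums_spec : Claim_equal_parse_for_nums := by
  intro line _
  unfold Spec_parse_for_nums parse_for_nums parse_for_nums_alt
  have h := (pvAB line.toList.length line.toList le_rfl).1 0 [] []
  simpa using h
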